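-- pv_equiv track=rewrite | github.com/githubnext/tsessebe | benchmarks/pandas/bench_hash_biject_array.py | hash_biject_array
-- ===== SOURCE A (Python) =====
-- def hash_biject_array(arr):
--     """Assign a stable integer code to each unique value."""
--     mapping = {}
--     codes = []
--     next_code = 0
--     for v in arr:
--         k = (type(v).__name__, v)
--         if k not in mapping:
--             mapping[k] = next_code
--             next_code += 1
--         codes.append(mapping[k])
--     return codes, {v: k for k, v in mapping.items()}
-- ===== SOURCE B (Python) =====
-- def hash_biject_array(arr):
--     """Assign a stable integer code to each unique value."""
--     keys = [(type(v).__name__, v) for v in arr]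
--     n = len(keys)
--     order = sorted(range(n), key=lambda i: keys[i])  # stable: equal keys keep index order
--     first_of = [0] * n   # first_of[i] = index of the first occurrence of keys[i]
--     firsts = []          # one first-occurrence index per distinct key (key-sorted order)
--     fi = 0
--     prev = None
--     for i in order:
--         k = keys[i]
--         if prev is None or prev != k:
--             fi = i
--             firsts.append(i)
--         first_of[i] = fi
--         prev = k
--     firsts.sort()        # ascending = first-occurrence (code) order
--     rank = [0] * n
--     for c, f in enumerate(firsts):
--         rank[f] = c
--     codes = [rank[first_of[i]] for i in range(n)]
--     return codes, {c: keys[f] for c, f in enumerate(firsts)}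
-- ===== Notes on version B (the rewrite author's own statement) =====
-- stated objective: alternative
-- what changed: Replaces A's single-pass hash-map factorization (incrementally assigning next_code on first sight of each key) with a sort-based one: argsort the indices by key, detect equal-key runs in the stably sorted order to find each key's first-occurrence index without any value-keyed lookup, sort those first-occurrence indices to recover first-seen order, and assign codes through plain integer index arrays.
import Mathlib
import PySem

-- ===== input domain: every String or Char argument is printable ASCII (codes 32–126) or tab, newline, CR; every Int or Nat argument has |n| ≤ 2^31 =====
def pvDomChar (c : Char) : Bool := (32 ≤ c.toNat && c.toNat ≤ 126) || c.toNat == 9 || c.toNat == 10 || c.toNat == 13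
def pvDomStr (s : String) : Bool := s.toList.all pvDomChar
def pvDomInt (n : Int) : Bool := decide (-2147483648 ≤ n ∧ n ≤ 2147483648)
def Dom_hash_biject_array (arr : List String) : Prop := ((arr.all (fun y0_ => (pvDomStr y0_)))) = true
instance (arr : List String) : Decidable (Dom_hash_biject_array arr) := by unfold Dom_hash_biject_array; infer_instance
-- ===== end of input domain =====

-- B replaces A's hash-map factorization with a sort-based one (argsort, run detection
-- on the stably sorted index order, rank of first-occurrence indices); objective:
-- alternative algorithm, equal results proved on all string inputs in the domain.
-- All inputs here are strings, so Python's key (type(v).__name__, v) is always ("str", v).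

-- ===== PORT A =====
-- one iteration of A's for-loop; state = (mapping, codes, next_code)
def pvAStep (st : PySem.Dict (String × String) Int × List Int × Int) (v : String) :
    PySem.Dict (String × String) Int × List Int × Int :=
  let k : String × String := ("str", v)
  let st' := if st.1.contains k then st else (st.1.insert k st.2.2, st.2.1, st.2.2 + 1)
  -- mapping[k]: the key is always present at this point, so Python's d[k] is getD k 0 (exact)
  (st'.1, st'.2.1 ++ [st'.1.getD k 0], st'.2.2)

def hash_biject_array (arr : List String) : List Int × (List (Int × String × String)) :=
  let st := arr.foldl pvAStep (PySem.Dict.empty, [], 0)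
  -- {v: k for k, v in mapping.items()}: a dict comprehension, returned as its items list
  (st.2.1, (PySem.Dict.ofList (st.1.items.map (fun p => (p.2, p.1)))).items)

-- ===== PORT B =====
-- body of B's 'for i in order' loop; state = (first_of, firsts, fi, prev)
def pvBStep (keys : List (String × String))
    (st : List Int × List Int × Int × Option (String × String)) (i : Int) :
    List Int × List Int × Int × Option (String × String) :=
  let k := PySem.List.pyGetD keys i ("str", "")
  -- 'if prev is None or prev != k' (prev is never a tuple-valued None clash: keys are tuples)
  if st.2.2.2 = none ∨ st.2.2.2 ≠ some k then
    (PySem.List.pySetD st.1 i i, st.2.1 ++ [i], i, some k)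
  else
    (PySem.List.pySetD st.1 i st.2.2.1, st.2.1, st.2.2.1, some k)

def hash_biject_array_alt (arr : List String) : List Int × (List (Int × String × String)) :=
  let keys := arr.map (fun v => (("str", v) : String × String))
  let n : Int := PySem.List.len keys
  -- sorted(range(n), key=lambda i: keys[i]) — tuple-valued key, hence sorted2 (PySem rule);
  -- keys[i] is in range for every produced index, the pyGetD default is never used
  let order := PySem.List.sorted2 (PySem.List.pyRange 0 n)
      (fun i => (PySem.List.pyGetD keys i ("str", "")).1)
      (fun i => (PySem.List.pyGetD keys i ("str", "")).2)
  let st := order.foldl (pvBStep keys) (PySem.List.pyRepeat [0] n, [], 0, none)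
  -- firsts.sort()
  let firsts := PySem.List.sorted st.2.1 (fun x => x)
  -- rank = [0]*n; for c, f in enumerate(firsts): rank[f] = c
  let rank := (PySem.List.enumerate firsts 0).foldl
      (fun r p => PySem.List.pySetD r p.2 p.1) (PySem.List.pyRepeat [0] n)
  let codes := (PySem.List.pyRange 0 n).map
      (fun i => PySem.List.pyGetD rank (PySem.List.pyGetD st.1 i 0) 0)
  (codes, (PySem.Dict.ofList ((PySem.List.enumerate firsts 0).map
      (fun p => (p.1, PySem.List.pyGetD keys p.2 ("str", ""))))).items)

-- ===== PRECONDITION & SPEC =====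
def Spec_hash_biject_array (arr : List String) (out : List Int × (List (Int × String × String))) : Prop := out = hash_biject_array_alt arr
instance (arr : List String) (out : List Int × (List (Int × String × String))) : Decidable (Spec_hash_biject_array arr out) := by unfold Spec_hash_biject_array; infer_instance

-- ===== CLAIM (what is proved, stated in full; the proofs are below) =====
def Claim_equal_hash_biject_array : Prop := ∀ (arr : List String), Dom_hash_biject_array arr → Spec_hash_biject_array arr (hash_biject_array arr)

-- ===== LEMMAS AND PROOFS =====

-- ---------- shared abbreviations (proof-side only) ----------

-- the key of index i (Python's keys[i]); the default is never used on in-range indices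
def pvKey (keys : List (String × String)) (i : Int) : String × String :=
  PySem.List.pyGetD keys i ("str", "")

-- first-occurrence index of key k, as an Int
def pvIdx (keys : List (String × String)) (k : String × String) : Int :=
  (keys.idxOf k : Int)

-- order in which B's stable argsort lists the indices: by key, ties by index
def pvLex (keys : List (String × String)) (a b : Int) : Prop :=
  (pvKey keys a).2 < (pvKey keys b).2 ∨ ((pvKey keys a).2 = (pvKey keys b).2 ∧ a < b)

-- the ascending list of first-occurrence indices, in first-seen (dedup) order
def pvF (keys : List (String × String)) : List Int :=
  (PySem.List.dedup keys).map (pvIdx keys)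

-- ---------- A-side machinery ----------

-- A's loop body, expressed on the precomputed key
def pvStep (st : PySem.Dict (String × String) Int × List Int × Int) (k : String × String) :
    PySem.Dict (String × String) Int × List Int × Int :=
  let st' := if st.1.contains k then st else (st.1.insert k st.2.2, st.2.1, st.2.2 + 1)
  (st'.1, st'.2.1 ++ [st'.1.getD k 0], st'.2.2)

-- the dict that maps the j-th element of a duplicate-free list u to j
def pvDictOf (u : List (String × String)) : PySem.Dict (String × String) Int :=
  PySem.Dict.ofList ((PySem.List.enumerate u 0).map (fun p => (p.2, p.1)))

lemma pvNodupSnoc (u : List (String × String)) (k : String × String)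
    (hu : u.Nodup) (hk : k ∉ u) : (u ++ [k]).Nodup := by
  simp only [List.nodup_append, List.nodup_singleton, true_and]
  exact ⟨hu, fun a ha b hb hab => hk (by rwa [hab, List.mem_singleton.mp hb] at ha)⟩

-- (Dict.ofList l).items = l for fresh keys
lemma pvItems_ofList {κ ν : Type} [BEq κ] [LawfulBEq κ] (l : List (κ × ν))
    (h : (l.map Prod.fst).Nodup) : (PySem.Dict.ofList l).items = l := by
  have hof : PySem.Dict.ofList l
      = l.foldl (fun d p => d.insert p.1 p.2) PySem.Dict.empty := PySem.Dict.ext_iff.mpr rfl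
  have hit := PySem.Dict.items_foldl_insert_fresh l Prod.fst Prod.snd PySem.Dict.empty
      (fun a _ => PySem.Dict.contains_empty _) h
  rw [hof]
  simpa using hit

lemma pvItems_pvDictOf (u : List (String × String)) (hu : u.Nodup) :
    (pvDictOf u).items = (PySem.List.enumerate u 0).map (fun p => (p.2, p.1)) := by
  apply pvItems_ofList
  simp [List.map_map, Function.comp_def]
  exact hu

lemma pvKeys_pvDictOf (u : List (String × String)) (hu : u.Nodup) :
    (pvDictOf u).keys = u := by
  simp only [PySem.Dict.keys, pvItems_pvDictOf u hu, List.map_map]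
  simp [Function.comp_def, PySem.List.map_snd_enumerate]

lemma pvGet?_pvDictOf (u : List (String × String)) (k : String × String)
    (hu : u.Nodup) (hk : k ∈ u) :
    (pvDictOf u).get? k = some (u.idxOf k : Int) := by
  apply PySem.Dict.get?_of_mem_items
  · rw [pvItems_pvDictOf u hu]
    refine List.mem_map.mpr ⟨((u.idxOf k : Int), k), ?_, rfl⟩
    rw [PySem.List.mem_enumerate_iff]
    exact ⟨u.idxOf k, List.idxOf_lt_length_of_mem hk, by simp [List.getElem_idxOf]⟩
  · rw [pvKeys_pvDictOf u hu]; exact hu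

lemma pvContains_pvDictOf (u : List (String × String)) (k : String × String) (hu : u.Nodup) :
    (pvDictOf u).contains k = decide (k ∈ u) := by
  rw [PySem.Dict.contains_eq_decide_mem_keys, pvKeys_pvDictOf u hu]

lemma pvInsert_pvDictOf (u : List (String × String)) (k : String × String)
    (hu : u.Nodup) (hk : k ∉ u) :
    (pvDictOf u).insert k (u.length : Int) = pvDictOf (u ++ [k]) := by
  have hnd : (u ++ [k]).Nodup := pvNodupSnoc u k hu hk
  apply PySem.Dict.ext
  rw [PySem.Dict.items_insert_of_not_contains _ _ (by simp [pvContains_pvDictOf u k hu, hk]),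
      pvItems_pvDictOf u hu, pvItems_pvDictOf _ hnd, PySem.List.enumerate_append]
  simp [PySem.List.enumerate]

lemma pvAdd_of_mem {α : Type} [BEq α] [LawfulBEq α] (u : List α) (k : α) (hk : k ∈ u) :
    PySem.Set.add u k = u := by
  simp [hk]

lemma pvAdd_of_not_mem {α : Type} [BEq α] [LawfulBEq α] (u : List α) (k : α) (hk : k ∉ u) :
    PySem.Set.add u k = u ++ [k] := by
  simp [hk]

lemma pvUpdate_prefix (ks : List (String × String)) :
    ∀ u : List (String × String), ∃ t, PySem.Set.update u ks = u ++ t := by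
  induction ks with
  | nil => exact fun u => ⟨[], by simp [PySem.Set.update]⟩
  | cons k ks ih =>
    intro u
    have hcons : PySem.Set.update u (k :: ks) = PySem.Set.update (PySem.Set.add u k) ks := rfl
    rcases ih (PySem.Set.add u k) with ⟨t, ht⟩
    by_cases hk : k ∈ u
    · exact ⟨t, by rw [hcons, ht, pvAdd_of_mem u k hk]⟩
    · exact ⟨[k] ++ t, by rw [hcons, ht, pvAdd_of_not_mem u k hk, List.append_assoc]⟩

lemma pvIdxOf_update (ks : List (String × String)) (u : List (String × String))
    (k : String × String) (hk : k ∈ u) :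
    (PySem.Set.update u ks).idxOf k = u.idxOf k := by
  rcases pvUpdate_prefix ks u with ⟨t, ht⟩
  rw [ht, List.idxOf_append_of_mem hk]

-- loop invariant of A's scan: starting from the dict of a duplicate-free list u,
-- the scan extends u to Set.update u ks and appends each key's index in that final list
lemma pv_inv (ks : List (String × String)) :
    ∀ (u : List (String × String)) (codes : List Int), u.Nodup →
      ks.foldl pvStep (pvDictOf u, codes, (u.length : Int)) =
        (pvDictOf (PySem.Set.update u ks),
         codes ++ ks.map (fun k => ((PySem.Set.update u ks).idxOf k : Int)),
         ((PySem.Set.update u ks).length : Int)) := by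
  induction ks with
  | nil => intro u codes hu; simp [PySem.Set.update]
  | cons k ks ih =>
    intro u codes hu
    rw [List.foldl_cons]
    have hcons : PySem.Set.update u (k :: ks) = PySem.Set.update (PySem.Set.add u k) ks := rfl
    by_cases hk : k ∈ u
    · have hstep : pvStep (pvDictOf u, codes, (u.length : Int)) k
          = (pvDictOf u, codes ++ [(u.idxOf k : Int)], (u.length : Int)) := by
        simp [pvStep, pvContains_pvDictOf u k hu, hk, PySem.Dict.getD_eq_get?_getD,
              pvGet?_pvDictOf u k hu hk]
      rw [hstep, ih u _ hu, hcons, pvAdd_of_mem u k hk]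
      refine Prod.ext rfl (Prod.ext ?_ rfl)
      simp [pvIdxOf_update ks u k hk]
    · have hstep : pvStep (pvDictOf u, codes, (u.length : Int)) k
          = (pvDictOf (u ++ [k]), codes ++ [(u.length : Int)], ((u ++ [k]).length : Int)) := by
        simp only [pvStep, pvContains_pvDictOf u k hu, hk, decide_false, Bool.false_eq_true,
          if_false, pvInsert_pvDictOf u k hu hk, PySem.Dict.getD_eq_get?_getD]
        rw [pvGet?_pvDictOf (u ++ [k]) k (pvNodupSnoc u k hu hk) (by simp),
            List.idxOf_append_of_notMem hk]
        simp
      have hnd : (u ++ [k]).Nodup := pvNodupSnoc u k hu hk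
      rw [hstep, ih (u ++ [k]) _ hnd, hcons, pvAdd_of_not_mem u k hk]
      refine Prod.ext rfl (Prod.ext ?_ rfl)
      have hidx : (PySem.Set.update (u ++ [k]) ks).idxOf k = (u.length : Nat) := by
        rw [pvIdxOf_update ks (u ++ [k]) k (by simp), List.idxOf_append_of_notMem hk]
        simp
      simp [hidx]

-- A's result, in closed form: codes by first-occurrence index in the dedup list,
-- reverse dict = enumerate of the dedup list
lemma pvA_char (arr : List String) :
    hash_biject_array arr =
      ((arr.map (fun v => (("str", v) : String × String))).map
          (fun k => ((PySem.List.dedup (arr.map (fun v => (("str", v) : String × String)))).idxOf k : Int)),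
       PySem.List.enumerate (PySem.List.dedup (arr.map (fun v => (("str", v) : String × String)))) 0) := by
  unfold hash_biject_array
  have hfn : pvAStep = fun st (v : String) => pvStep st ("str", v) := by
    funext st v; rfl
  have hfold : arr.foldl pvAStep (PySem.Dict.empty, ([] : List Int), (0 : Int))
      = (arr.map (fun v => (("str", v) : String × String))).foldl pvStep
          (PySem.Dict.empty, [], 0) := by
    rw [hfn, ← List.foldl_map]
  set keys := arr.map (fun v => (("str", v) : String × String)) with hkeys
  have h0 : ((PySem.Dict.empty : PySem.Dict (String × String) Int), ([] : List Int), (0 : Int))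
      = (pvDictOf [], [], ((List.length ([] : List (String × String))) : Int)) := rfl
  have hU : PySem.Set.update ([] : List (String × String)) keys = PySem.List.dedup keys := rfl
  have hnd : (PySem.List.dedup keys).Nodup := PySem.List.nodup_dedup keys
  rw [hfold, h0, pv_inv keys [] [] List.nodup_nil, hU]
  refine Prod.ext (by simp) ?_
  show (PySem.Dict.ofList ((pvDictOf (PySem.List.dedup keys)).items.map (fun p => (p.2, p.1)))).items = _
  rw [pvItems_pvDictOf _ hnd]
  have hswap : ((PySem.List.enumerate (PySem.List.dedup keys) 0).map
      (fun p : Int × (String × String) => (p.2, p.1))).map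
        (fun p : (String × String) × Int => (p.2, p.1))
      = PySem.List.enumerate (PySem.List.dedup keys) 0 := by
    simp [List.map_map, Function.comp_def]
  rw [hswap, pvItems_ofList]
  have hp := PySem.List.pairwise_lt_enumerate (PySem.List.dedup keys) 0
  exact (List.pairwise_map.mpr hp).nodup

-- ---------- B-side machinery ----------

-- every entry that pyGetD can produce here has first component "str"
lemma pvKey_fst (arr : List String) (i : Int) :
    (pvKey (arr.map (fun v => (("str", v) : String × String))) i).1 = "str" := by
  unfold pvKey PySem.List.pyGetD
  rcases h : PySem.List.pyGet? (arr.map (fun v => (("str", v) : String × String))) i with _ | x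
  · rfl
  · have hm := PySem.List.mem_of_pyGet?_eq_some _ h
    rcases List.mem_map.mp hm with ⟨v, _, rfl⟩
    rfl

-- the argsort's tuple key has constant first component, so sorted2 is sorted on the second
lemma pvSorted2_eq_sorted (arr : List String) :
    PySem.List.sorted2 (PySem.List.pyRange 0 (PySem.List.len (arr.map (fun v => (("str", v) : String × String)))))
      (fun i => (PySem.List.pyGetD (arr.map (fun v => (("str", v) : String × String))) i ("str", "")).1)
      (fun i => (PySem.List.pyGetD (arr.map (fun v => (("str", v) : String × String))) i ("str", "")).2)
    = PySem.List.sorted (PySem.List.pyRange 0 (PySem.List.len (arr.map (fun v => (("str", v) : String × String)))))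
      (fun i => (pvKey (arr.map (fun v => (("str", v) : String × String))) i).2) := by
  rw [PySem.List.sorted_eq_foldl_insertBy]
  show List.foldl (fun acc x => PySem.List.insertBy _ x acc) [] _ = _
  have hpq : (fun (a b : Int) =>
        decide ((PySem.List.pyGetD (arr.map (fun v => (("str", v) : String × String))) a ("str", "")).1
            < (PySem.List.pyGetD (arr.map (fun v => (("str", v) : String × String))) b ("str", "")).1)
        || !decide ((PySem.List.pyGetD (arr.map (fun v => (("str", v) : String × String))) b ("str", "")).1
            < (PySem.List.pyGetD (arr.map (fun v => (("str", v) : String × String))) a ("str", "")).1)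
          && decide ((PySem.List.pyGetD (arr.map (fun v => (("str", v) : String × String))) a ("str", "")).2
            < (PySem.List.pyGetD (arr.map (fun v => (("str", v) : String × String))) b ("str", "")).2))
      = (fun (a b : Int) =>
        decide ((pvKey (arr.map (fun v => (("str", v) : String × String))) a).2
            < (pvKey (arr.map (fun v => (("str", v) : String × String))) b).2)) := by
    funext a b
    have ha := pvKey_fst arr a
    have hb := pvKey_fst arr b
    unfold pvKey at ha hb ⊢
    rw [ha, hb]
    simp
  rw [hpq]
  norm_num

lemma pvInsertBy_nil {α : Type} (p : α → α → Bool) (x : α) :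
    PySem.List.insertBy p x [] = [x] := rfl

lemma pvInsertBy_cons {α : Type} (p : α → α → Bool) (x y : α) (ys : List α) :
    PySem.List.insertBy p x (y :: ys)
      = if p x y then x :: y :: ys else y :: PySem.List.insertBy p x ys := rfl

-- inserting an element larger (as an index) than everything in a pvLex-sorted list keeps it sorted
lemma pvInsertBy_pairwise (keys : List (String × String)) (x : Int) :
    ∀ acc : List Int, acc.Pairwise (pvLex keys) → (∀ y ∈ acc, y < x) →
      (PySem.List.insertBy (fun a b => decide ((pvKey keys a).2 < (pvKey keys b).2)) x acc).Pairwise (pvLex keys) := by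
  intro acc
  induction acc with
  | nil => intro _ _; rw [pvInsertBy_nil]; simp
  | cons y ys ih =>
    intro hp hlt
    rcases List.pairwise_cons.mp hp with ⟨hy, hys⟩
    rw [pvInsertBy_cons]
    by_cases hxy : (pvKey keys x).2 < (pvKey keys y).2
    · rw [if_pos (by simpa using hxy)]
      refine List.pairwise_cons.mpr ⟨?_, hp⟩
      intro z hz
      rcases List.mem_cons.mp hz with rfl | hz'
      · exact Or.inl hxy
      · refine Or.inl (lt_of_lt_of_le hxy ?_)
        rcases hy z hz' with h | h
        · exact le_of_lt h
        · exact le_of_eq h.1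
    · rw [if_neg (by simpa using hxy)]
      refine List.pairwise_cons.mpr
        ⟨?_, ih hys (fun z hz => hlt z (List.mem_cons_of_mem _ hz))⟩
      intro z hz
      rcases (PySem.List.mem_insertBy _ _ _ _).mp hz with rfl | hz'
      · rcases lt_or_eq_of_le (not_lt.mp hxy) with h | h
        · exact Or.inl h
        · exact Or.inr ⟨h, hlt y List.mem_cons_self⟩
      · exact hy z hz' 

-- stability: sorting a strictly increasing index list by key yields a pvLex-sorted list
lemma pvSorted_pairwise_lex (keys : List (String × String)) (xs : List Int)
    (hxs : xs.Pairwise (· < ·)) :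
    (PySem.List.sorted xs (fun i => (pvKey keys i).2)).Pairwise (pvLex keys) := by
  induction xs using List.reverseRecOn with
  | nil =>
    rw [PySem.List.sorted_eq_foldl_insertBy]
    simp
  | append_singleton l x ih =>
    rw [PySem.List.sorted_eq_foldl_insertBy, List.foldl_append, List.foldl_cons, List.foldl_nil,
        ← PySem.List.sorted_eq_foldl_insertBy]
    rcases List.pairwise_append.mp hxs with ⟨hl, _, hcross⟩
    refine pvInsertBy_pairwise keys x _ (ih hl) ?_
    intro y hy
    exact hcross y ((PySem.List.mem_sorted l _ false y).mp hy) x (List.mem_singleton_self x)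

-- dedup of a snoc
lemma pvDedup_snoc_mem {α : Type} [BEq α] [LawfulBEq α] (l : List α) (x : α) (h : x ∈ l) :
    PySem.List.dedup (l ++ [x]) = PySem.List.dedup l := by
  rw [PySem.List.dedup_eq_ofList, PySem.List.dedup_eq_ofList]
  unfold PySem.Set.ofList
  rw [List.foldl_append, List.foldl_cons, List.foldl_nil]
  exact pvAdd_of_mem _ _ ((PySem.Set.mem_ofList l x).mpr h)

lemma pvDedup_snoc_not_mem {α : Type} [BEq α] [LawfulBEq α] (l : List α) (x : α) (h : x ∉ l) :
    PySem.List.dedup (l ++ [x]) = PySem.List.dedup l ++ [x] := by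
  rw [PySem.List.dedup_eq_ofList, PySem.List.dedup_eq_ofList]
  unfold PySem.Set.ofList
  rw [List.foldl_append, List.foldl_cons, List.foldl_nil]
  exact pvAdd_of_not_mem _ _ (fun hm => h ((PySem.Set.mem_ofList l x).mp hm))

-- the first-occurrence indices of the dedup list are strictly increasing
lemma pvF_pairwise (keys : List (String × String)) : (pvF keys).Pairwise (· < ·) := by
  unfold pvF pvIdx
  induction keys using List.reverseRecOn with
  | nil => simp [PySem.List.dedup, PySem.Set.ofList]
  | append_singleton l x ih =>
    by_cases hx : x ∈ l
    · rw [pvDedup_snoc_mem l x hx]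
      have hcongr : (PySem.List.dedup l).map (fun k => (((l ++ [x]).idxOf k : Nat) : Int))
          = (PySem.List.dedup l).map (fun k => ((l.idxOf k : Nat) : Int)) := by
        refine List.map_congr_left fun k hk => ?_
        rw [List.idxOf_append_of_mem ((PySem.List.mem_dedup l k).mp hk)]
      rw [hcongr]; exact ih
    · rw [pvDedup_snoc_not_mem l x hx, List.map_append]
      rw [List.pairwise_append]
      refine ⟨?_, by simp, ?_⟩
      · have hcongr : (PySem.List.dedup l).map (fun k => (((l ++ [x]).idxOf k : Nat) : Int))
            = (PySem.List.dedup l).map (fun k => ((l.idxOf k : Nat) : Int)) := by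
          refine List.map_congr_left fun k hk => ?_
          rw [List.idxOf_append_of_mem ((PySem.List.mem_dedup l k).mp hk)]
        rw [hcongr]; exact ih
      · intro a ha b hb
        rcases List.mem_map.mp ha with ⟨k, hk, rfl⟩
        rcases List.mem_singleton.mp hb with rfl
        have h1 : (l ++ [x]).idxOf k = l.idxOf k :=
          List.idxOf_append_of_mem ((PySem.List.mem_dedup l k).mp hk)
        have h2 : (l ++ [x]).idxOf x = l.length := by
          rw [List.idxOf_append_of_notMem hx]; simp
        show ((l ++ [x]).idxOf k : Int) < ((l ++ [x]).idxOf x : Int)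
        rw [h1, h2]
        have := List.idxOf_lt_length_of_mem ((PySem.List.mem_dedup l k).mp hk)
        exact_mod_cast this

-- pvLex implies a weak key inequality
lemma pvLex_le (keys : List (String × String)) {a b : Int} (h : pvLex keys a b) :
    (pvKey keys a).2 ≤ (pvKey keys b).2 := by
  rcases h with h | h
  · exact le_of_lt h
  · exact le_of_eq h.1

-- in-range reads are getElem
lemma pvKey_getElem (keys : List (String × String)) (j : Int) (h0 : 0 ≤ j)
    (h1 : j < (keys.length : Int)) : pvKey keys j = keys[j.toNat]'(by omega) := by
  exact PySem.List.pyGetD_eq_getElem keys _ h0 h1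

-- idxOf never passes an occurrence
lemma pvIdxOf_min {α : Type} [BEq α] [LawfulBEq α] :
    ∀ (l : List α) (m : Nat) (hm : m < l.length), l.idxOf l[m] ≤ m := by
  intro l
  induction l with
  | nil => intro m hm; cases hm
  | cons x t ih =>
    intro m hm
    cases m with
    | zero => simp
    | succ m' =>
      by_cases hx : x = (x :: t)[m' + 1]
      · rw [← hx]; simp
      · have : (x :: t)[m' + 1] = t[m']'(by simpa using hm) := by simp
        rw [this, List.idxOf_cons_ne _ (by rw [this] at hx; exact hx)]
        have := ih m' (by simpa using hm)
        omega

-- writing at one position: read back / read elsewhere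
lemma pvGetD_pySetD_self (r : List Int) (i v : Int) (hi0 : 0 ≤ i)
    (hin : i < (r.length : Int)) :
    PySem.List.pyGetD (PySem.List.pySetD r i v) i 0 = v := by
  have hieq : i = ((i.toNat : Nat) : Int) := (Int.toNat_of_nonneg hi0).symm
  rw [hieq, PySem.List.pyGetD_pySetD_natCast]
  · rw [if_pos rfl]
  · omega

lemma pvGetD_pySetD_ne (r : List Int) (i j v : Int) (hi0 : 0 ≤ i)
    (hin : i < (r.length : Int)) (hj0 : 0 ≤ j) (hne : j ≠ i) :
    PySem.List.pyGetD (PySem.List.pySetD r i v) j 0 = PySem.List.pyGetD r j 0 := by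
  have hieq : i = ((i.toNat : Nat) : Int) := (Int.toNat_of_nonneg hi0).symm
  have hjeq : j = ((j.toNat : Nat) : Int) := (Int.toNat_of_nonneg hj0).symm
  rw [hieq, hjeq, PySem.List.pyGetD_pySetD_natCast]
  · rw [if_neg]
    intro h
    exact hne (by rw [hieq, hjeq, h])
  · omega

-- if the last already-processed key differs from keys[i], no processed index shares keys[i]
lemma pvNotInDone (keys : List (String × String))
    (hstr : ∀ a : Int, (pvKey keys a).1 = "str")
    (done₀ : List Int) (lst i : Int) (rest' : List Int)
    (hpair : ((done₀ ++ [lst]) ++ i :: rest').Pairwise (pvLex keys))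
    (hne : pvKey keys lst ≠ pvKey keys i) :
    pvKey keys i ∉ (done₀ ++ [lst]).map (pvKey keys) := by
  intro hmem
  rcases List.mem_map.mp hmem with ⟨d, hd, heq⟩
  rcases List.pairwise_append.mp hpair with ⟨hfst, _, hcross⟩
  have hlsti : pvLex keys lst i :=
    hcross lst (by simp) i (List.mem_cons_self)
  rcases List.mem_append.mp hd with hd0 | hdl
  · rcases List.pairwise_append.mp hfst with ⟨_, _, hcross0⟩
    have hdlst : pvLex keys d lst := hcross0 d hd0 lst (List.mem_singleton_self lst)
    have h1 : (pvKey keys d).2 ≤ (pvKey keys lst).2 := pvLex_le keys hdlst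
    have h2 : (pvKey keys lst).2 ≤ (pvKey keys i).2 := pvLex_le keys hlsti
    have h3 : (pvKey keys d).2 = (pvKey keys i).2 := by rw [heq]
    have h4 : (pvKey keys lst).2 = (pvKey keys i).2 := le_antisymm h2 (h3 ▸ h1)
    exact hne (Prod.ext (by rw [hstr lst, hstr i]) h4)
  · rcases List.mem_singleton.mp hdl with rfl
    exact hne heq

-- a run head in the sorted order is the first occurrence of its key
lemma pvFirstOcc (keys : List (String × String)) (done rest' : List Int) (i : Int)
    (hmem : ∀ j, j ∈ done ++ i :: rest' ↔ 0 ≤ j ∧ j < (keys.length : Int))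
    (hpair : (done ++ i :: rest').Pairwise (pvLex keys))
    (hnotin : pvKey keys i ∉ done.map (pvKey keys)) :
    pvIdx keys (pvKey keys i) = i := by
  have hi := (hmem i).mp (by simp)
  have hik : pvKey keys i = keys[i.toNat]'(by omega) := pvKey_getElem keys i hi.1 hi.2
  have hkmem : pvKey keys i ∈ keys := by rw [hik]; exact List.getElem_mem _
  set f : Nat := keys.idxOf (pvKey keys i) with hf
  have hflt : f < keys.length := List.idxOf_lt_length_of_mem hkmem
  have hkf : keys[f] = pvKey keys i := List.getElem_idxOf hflt
  have hfle : f ≤ i.toNat := by rw [hf, hik]; exact pvIdxOf_min keys i.toNat (by omega)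
  have hfmem : (f : Int) ∈ done ++ i :: rest' := (hmem _).mpr (by omega)
  have hkeyf : pvKey keys (f : Int) = pvKey keys i := by
    rw [pvKey_getElem keys (f : Int) (by omega) (by exact_mod_cast hflt)]
    simpa using hkf
  rcases List.mem_append.mp hfmem with hfd | hfc
  · exact absurd (List.mem_map.mpr ⟨(f : Int), hfd, hkeyf⟩) hnotin
  · rcases List.mem_cons.mp hfc with hfi | hfr
    · rw [pvIdx, ← hf, hfi]
    · rcases List.pairwise_append.mp hpair with ⟨_, hsnd, _⟩
      have hlex : pvLex keys i (f : Int) :=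
        (List.pairwise_cons.mp hsnd).1 _ hfr
      rcases hlex with h | h
      · rw [hkeyf] at h; exact absurd h (lt_irrefl _)
      · have : i < (f : Int) := h.2
        omega

-- B's scan over the sorted index order: first_of gets every index's first-occurrence
-- index, and firsts collects one first-occurrence index per distinct key
lemma pvScan (keys : List (String × String))
    (hstr : ∀ a : Int, (pvKey keys a).1 = "str") :
    ∀ (rest done first_of firsts : List Int) (fi : Int) (prev : Option (String × String)),
      (done ++ rest).Perm (PySem.List.pyRange 0 (PySem.List.len keys)) →
      (done ++ rest).Pairwise (pvLex keys) →
      first_of.length = keys.length →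
      (∀ j ∈ done, PySem.List.pyGetD first_of j 0 = pvIdx keys (pvKey keys j)) →
      firsts = (PySem.List.dedup (done.map (pvKey keys))).map (pvIdx keys) →
      prev = (done.getLast?).map (pvKey keys) →
      (∀ lst, done.getLast? = some lst → fi = pvIdx keys (pvKey keys lst)) →
      (rest.foldl (pvBStep keys) (first_of, firsts, fi, prev)).1.length = keys.length ∧
      (∀ j ∈ done ++ rest,
        PySem.List.pyGetD (rest.foldl (pvBStep keys) (first_of, firsts, fi, prev)).1 j 0
          = pvIdx keys (pvKey keys j)) ∧
      (rest.foldl (pvBStep keys) (first_of, firsts, fi, prev)).2.1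
        = (PySem.List.dedup ((done ++ rest).map (pvKey keys))).map (pvIdx keys) := by
  intro rest
  induction rest with
  | nil =>
    intro done first_of firsts fi prev hperm hpair hlen hdone hfirsts hprevh hfi
    refine ⟨hlen, ?_, ?_⟩
    · intro j hj; exact hdone j (by simpa using hj)
    · simpa using hfirsts
  | cons i rest' ih =>
    intro done first_of firsts fi prev hperm hpair hlen hdone hfirsts hprevh hfi
    have hlenI : PySem.List.len keys = (keys.length : Int) := rfl
    have hmem : ∀ j, j ∈ done ++ i :: rest' ↔ 0 ≤ j ∧ j < (keys.length : Int) := by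
      intro j
      rw [hperm.mem_iff, hlenI]
      exact PySem.List.mem_pyRange_one
    have hnd : (done ++ i :: rest').Nodup := by
      refine hperm.nodup_iff.mpr ?_
      rw [hlenI, PySem.List.pyRange_zero_natCast]
      exact List.nodup_range.map (fun a b hab => by exact_mod_cast hab)
    have hi := (hmem i).mp (by simp)
    have e : (done ++ [i]) ++ rest' = done ++ i :: rest' := by simp
    have hk : PySem.List.pyGetD keys i ("str", "") = pvKey keys i := rfl
    rw [List.foldl_cons]
    by_cases hc : prev = none ∨ prev ≠ some (pvKey keys i)
    · -- boundary: i starts a new run, and is the first occurrence of its key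
      have hstep : pvBStep keys (first_of, firsts, fi, prev) i
          = (PySem.List.pySetD first_of i i, firsts ++ [i], i, some (pvKey keys i)) := by
        unfold pvBStep
        rw [hk, if_pos hc]
      have hnotin : pvKey keys i ∉ done.map (pvKey keys) := by
        rcases hdone_cases : done.getLast? with _ | lst
        · rw [List.getLast?_eq_none_iff.mp hdone_cases]; simp
        · rcases List.getLast?_eq_some_iff.mp hdone_cases with ⟨done₀, rfl⟩
          have hne : pvKey keys lst ≠ pvKey keys i := by
            rcases hc with hc | hc
            · rw [hprevh, hdone_cases] at hc; cases hc
            · rw [hprevh, hdone_cases] at hc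
              simpa using hc
          exact pvNotInDone keys hstr done₀ lst i rest' hpair hne
      have hfo : pvIdx keys (pvKey keys i) = i :=
        pvFirstOcc keys done rest' i hmem hpair hnotin
      rw [hstep]
      have hr := ih (done ++ [i]) (PySem.List.pySetD first_of i i) (firsts ++ [i]) i
          (some (pvKey keys i))
          (by rw [e]; exact hperm)
          (by rw [e]; exact hpair)
          (by rw [PySem.List.length_pySetD]; exact hlen)
          (by
            intro j hj
            rcases List.mem_append.mp hj with hjd | hji
            · have hj' := (hmem j).mp (List.mem_append_left _ hjd)
              have hji : j ≠ i := fun hji =>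
                (List.disjoint_of_nodup_append hnd) hjd (by rw [hji]; exact List.mem_cons_self)
              rw [pvGetD_pySetD_ne first_of i j i hi.1 (hlen ▸ hi.2) hj'.1 hji]
              exact hdone j hjd
            · have hji' : j = i := List.mem_singleton.mp hji
              rw [hji', pvGetD_pySetD_self first_of i i hi.1 (hlen ▸ hi.2)]
              exact hfo.symm)
          (by
            rw [List.map_append]
            simp only [List.map_cons, List.map_nil]
            rw [pvDedup_snoc_not_mem _ _ hnotin, List.map_append, ← hfirsts]
            simp [hfo])
          (by simp)
          (by
            intro lst hlst
            rw [List.getLast?_concat] at hlst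
            rw [← Option.some.inj hlst]
            exact hfo.symm)
      rw [e] at hr
      exact hr
    · -- continuation of a run: the previous key equals keys[i]
      rw [not_or, not_not] at hc
      rcases hdone_cases : done.getLast? with _ | lst
      · rw [hprevh, hdone_cases] at hc; simp at hc
      · have hprev_some : prev = some (pvKey keys lst) := by
          rw [hprevh, hdone_cases]; rfl
        have hkeq : pvKey keys lst = pvKey keys i := by
          have := hc.2
          rw [hprev_some] at this
          simpa using this
        have hfi_val : fi = pvIdx keys (pvKey keys i) := by
          rw [← hkeq]; exact hfi lst hdone_cases
        have hstep : pvBStep keys (first_of, firsts, fi, prev) i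
            = (PySem.List.pySetD first_of i fi, firsts, fi, some (pvKey keys i)) := by
          unfold pvBStep
          rw [hk, if_neg]
          rw [not_or, not_not]
          exact hc
        have hlst_mem : lst ∈ done := List.mem_of_getLast? hdone_cases
        have hkin : pvKey keys i ∈ done.map (pvKey keys) :=
          List.mem_map.mpr ⟨lst, hlst_mem, hkeq⟩
        rw [hstep]
        have hr := ih (done ++ [i]) (PySem.List.pySetD first_of i fi) firsts fi
            (some (pvKey keys i))
            (by rw [e]; exact hperm)
            (by rw [e]; exact hpair)
            (by rw [PySem.List.length_pySetD]; exact hlen)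
            (by
              intro j hj
              rcases List.mem_append.mp hj with hjd | hji
              · have hj' := (hmem j).mp (List.mem_append_left _ hjd)
                have hji : j ≠ i := fun hji =>
                  (List.disjoint_of_nodup_append hnd) hjd (by rw [hji]; exact List.mem_cons_self)
                rw [pvGetD_pySetD_ne first_of i j fi hi.1 (hlen ▸ hi.2) hj'.1 hji]
                exact hdone j hjd
              · have hji' : j = i := List.mem_singleton.mp hji
                rw [hji', pvGetD_pySetD_self first_of i fi hi.1 (hlen ▸ hi.2)]
                exact hfi_val)
            (by
              rw [List.map_append]
              simp only [List.map_cons, List.map_nil]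
              rw [pvDedup_snoc_mem _ _ hkin]
              exact hfirsts)
            (by simp)
            (by
              intro lst' hlst'
              rw [List.getLast?_concat] at hlst'
              rw [← Option.some.inj hlst']
              exact hfi_val)
        rw [e] at hr
        exact hr

-- positions not written by the fold keep their value
lemma pvGetD_foldl_pySetD (n : Nat) :
    ∀ (rest : List (Int × Int)) (r : List Int) (f : Int), r.length = n →
      0 ≤ f → f < (n : Int) → (∀ p ∈ rest, 0 ≤ p.2 ∧ p.2 < (n : Int)) →
      f ∉ rest.map Prod.snd →
      PySem.List.pyGetD (rest.foldl (fun r q => PySem.List.pySetD r q.2 q.1) r) f 0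
        = PySem.List.pyGetD r f 0 := by
  intro rest
  induction rest with
  | nil => intro r f _ _ _ _ _; rfl
  | cons q rest ih =>
    intro r f hlen hf0 hfn hb hnm
    rw [List.foldl_cons]
    have hq := hb q List.mem_cons_self
    have hlen' : (PySem.List.pySetD r q.2 q.1).length = n := by
      rw [PySem.List.length_pySetD]; exact hlen
    rw [ih _ f hlen' hf0 hfn (fun p hp => hb p (List.mem_cons_of_mem _ hp))
        (fun hm => hnm (by simpa using Or.inr (by simpa using hm)))]
    have hfeq : f = ((f.toNat : Nat) : Int) := (Int.toNat_of_nonneg hf0).symm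
    have hqeq : q.2 = ((q.2.toNat : Nat) : Int) := (Int.toNat_of_nonneg hq.1).symm
    rw [hfeq, hqeq, PySem.List.pyGetD_pySetD_natCast]
    · rw [if_neg]
      intro h
      apply hnm
      simp only [List.map_cons, List.mem_cons]
      left
      rw [hfeq, hqeq, h]
    · rw [hlen]
      exact_mod_cast (hqeq ▸ hq.2)

-- the rank array: writing c at position f for the pairs (c, f) of an injective-snd
-- association leaves exactly rank[f] = c readable
lemma pvRank (n : Nat) :
    ∀ (pairs : List (Int × Int)) (r0 : List Int), r0.length = n →
      (pairs.map Prod.snd).Nodup →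
      (∀ p ∈ pairs, 0 ≤ p.2 ∧ p.2 < (n : Int)) →
      ∀ p ∈ pairs,
        PySem.List.pyGetD (pairs.foldl (fun r q => PySem.List.pySetD r q.2 q.1) r0) p.2 0 = p.1 := by
  intro pairs
  induction pairs with
  | nil => intro r0 _ _ _ p hp; cases hp
  | cons q rest ih =>
    intro r0 hlen hnd hb p hp
    rw [List.foldl_cons]
    have hq := hb q List.mem_cons_self
    have hlen' : (PySem.List.pySetD r0 q.2 q.1).length = n := by
      rw [PySem.List.length_pySetD]; exact hlen
    have hnd2 : (q.2 :: List.map Prod.snd rest).Nodup := by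
      simpa only [List.map_cons] using hnd
    have hnd' := List.nodup_cons.mp hnd2
    rcases List.mem_cons.mp hp with rfl | hp'
    · rw [pvGetD_foldl_pySetD n rest _ p.2 hlen' hq.1 hq.2
          (fun r hr => hb r (List.mem_cons_of_mem _ hr)) hnd'.1]
      have hqeq : p.2 = ((p.2.toNat : Nat) : Int) := (Int.toNat_of_nonneg hq.1).symm
      rw [hqeq, PySem.List.pyGetD_pySetD_natCast]
      · rw [if_pos rfl]
      · rw [hlen]
        exact_mod_cast (hqeq ▸ hq.2)
    · exact ih _ hlen' hnd'.2 (fun r hr => hb r (List.mem_cons_of_mem _ hr)) p hp' 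

-- B's result in the same closed form as A's
lemma pvB_char (arr : List String) :
    hash_biject_array_alt arr =
      ((arr.map (fun v => (("str", v) : String × String))).map
          (fun k => ((PySem.List.dedup (arr.map (fun v => (("str", v) : String × String)))).idxOf k : Int)),
       PySem.List.enumerate (PySem.List.dedup (arr.map (fun v => (("str", v) : String × String)))) 0) := by
  have hstr := pvKey_fst arr
  set keys := arr.map (fun v => (("str", v) : String × String)) with hkeys
  have hlenI : PySem.List.len keys = (keys.length : Int) := rfl
  set n : Int := PySem.List.len keys with hn
  set order := PySem.List.sorted (PySem.List.pyRange 0 n) (fun i => (pvKey keys i).2)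
    with horder_def
  have hperm : order.Perm (PySem.List.pyRange 0 n) := PySem.List.sorted_perm _ _ _
  have hprange : (PySem.List.pyRange 0 n).Pairwise (· < · : Int → Int → Prop) := by
    have h : (PySem.List.pyRange 0 ((keys.length : Nat) : Int)).Pairwise
        (· < · : Int → Int → Prop) := by
      rw [PySem.List.pyRange_zero_natCast]
      exact List.pairwise_map.mpr (List.pairwise_lt_range.imp (fun h => by exact_mod_cast h))
    exact h
  have hpair : order.Pairwise (pvLex keys) := pvSorted_pairwise_lex keys _ hprange
  have hscan := pvScan keys hstr order [] (PySem.List.pyRepeat [0] n) [] 0 none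
      (by simpa using hperm)
      (by simpa using hpair)
      (by rw [PySem.List.pyRepeat_singleton]; simp [hn])
      (by intro j hj; cases hj)
      (by simp [PySem.List.dedup, PySem.Set.ofList])
      (by simp)
      (by intro lst h; cases h)
  simp only [List.nil_append] at hscan
  obtain ⟨hlen_fo, hfo, hfirsts⟩ := hscan
  -- the sorted range projects back onto keys
  have hmapkeys : (PySem.List.pyRange 0 n).map (pvKey keys) = keys :=
    PySem.List.map_pyGetD_pyRange_zero keys ("str", "")
  have hkeysperm : (order.map (pvKey keys)).Perm keys := by
    have h := hperm.map (pvKey keys)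
    rwa [hmapkeys] at h
  have hdedupperm : (pvF keys).Perm
      ((PySem.List.dedup (order.map (pvKey keys))).map (pvIdx keys)) := by
    refine List.Perm.map _ ?_
    refine (List.perm_ext_iff_of_nodup (PySem.List.nodup_dedup _) (PySem.List.nodup_dedup _)).mpr ?_
    intro a
    rw [PySem.List.mem_dedup, PySem.List.mem_dedup, hkeysperm.mem_iff]
  -- firsts.sort() is exactly the first-occurrence indices in dedup order
  have hsorted_firsts :
      PySem.List.sorted ((PySem.List.dedup (order.map (pvKey keys))).map (pvIdx keys))
        (fun x => x) = pvF keys := by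
    refine PySem.List.sorted_eq_of_perm_of_pairwise_lt _ _ _ hdedupperm ?_
    simpa using pvF_pairwise keys
  have hlenF : (pvF keys).length = (PySem.List.dedup keys).length := by
    simp [pvF]
  -- rank[f] = c for (c, f) in enumerate(pvF)
  have hpairsnd : ((PySem.List.enumerate (pvF keys) 0).map Prod.snd).Nodup := by
    have h := PySem.List.map_snd_enumerate (pvF keys) 0
    have : (PySem.List.enumerate (pvF keys) 0).map Prod.snd = pvF keys := h
    rw [this]
    exact (pvF_pairwise keys).nodup
  have hbounds : ∀ p ∈ PySem.List.enumerate (pvF keys) 0,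
      0 ≤ p.2 ∧ p.2 < ((keys.length : Nat) : Int) := by
    intro p hp
    rcases (PySem.List.mem_enumerate_iff _ _ _).mp hp with ⟨k, hk, rfl⟩
    have hk' : k < (PySem.List.dedup keys).length := by rwa [hlenF] at hk
    have hgetF : (pvF keys)[k]'hk = pvIdx keys ((PySem.List.dedup keys)[k]'hk') := by
      simp [pvF]
    constructor
    · simp only [hgetF, pvIdx]; positivity
    · simp only [hgetF, pvIdx]
      have hmem : (PySem.List.dedup keys)[k]'hk' ∈ keys :=
        (PySem.List.mem_dedup _ _).mp (List.getElem_mem _)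
      exact_mod_cast List.idxOf_lt_length_of_mem hmem
  have hrank := pvRank keys.length (PySem.List.enumerate (pvF keys) 0)
      (PySem.List.pyRepeat [0] n)
      (by rw [PySem.List.pyRepeat_singleton]; simp [hn]) hpairsnd hbounds
  -- looking a first-occurrence index up in rank yields the dedup position
  have hlook : ∀ k ∈ keys,
      PySem.List.pyGetD
        ((PySem.List.enumerate (pvF keys) 0).foldl
          (fun r q => PySem.List.pySetD r q.2 q.1) (PySem.List.pyRepeat [0] n))
        (pvIdx keys k) 0
      = ((PySem.List.dedup keys).idxOf k : Int) := by
    intro k hkmem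
    have hmemd : k ∈ PySem.List.dedup keys := (PySem.List.mem_dedup _ _).mpr hkmem
    set c : Nat := (PySem.List.dedup keys).idxOf k with hc
    have hclt : c < (PySem.List.dedup keys).length := List.idxOf_lt_length_of_mem hmemd
    have hcltF : c < (pvF keys).length := by rwa [hlenF]
    have hgetc : (PySem.List.dedup keys)[c]'hclt = k := List.getElem_idxOf hclt
    have hpmem : ((c : Int), pvIdx keys k) ∈ PySem.List.enumerate (pvF keys) 0 := by
      rw [PySem.List.mem_enumerate_iff]
      refine ⟨c, hcltF, ?_⟩
      have hFc : (pvF keys)[c]'hcltF = pvIdx keys ((PySem.List.dedup keys)[c]'hclt) := by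
        simp only [pvF, List.getElem_map]
      rw [hFc, hgetc]
      simp
    have := hrank ((c : Int), pvIdx keys k) hpmem
    simpa using this
  -- assemble
  simp only [hash_biject_array_alt]
  rw [← hkeys, pvSorted2_eq_sorted arr, ← hkeys, ← hn, ← horder_def, hfirsts, hsorted_firsts]
  refine Prod.ext ?_ ?_
  · -- codes
    show (PySem.List.pyRange 0 n).map _ = _
    have hstep1 : ∀ i ∈ PySem.List.pyRange 0 n,
        PySem.List.pyGetD
          ((PySem.List.enumerate (pvF keys) 0).foldl
            (fun r q => PySem.List.pySetD r q.2 q.1) (PySem.List.pyRepeat [0] n))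
          (PySem.List.pyGetD (order.foldl (pvBStep keys) (PySem.List.pyRepeat [0] n, [], 0, none)).1 i 0) 0
        = ((PySem.List.dedup keys).idxOf (pvKey keys i) : Int) := by
      intro i hi
      have hio : i ∈ order := hperm.mem_iff.mpr hi
      rw [hfo i hio]
      have hmpr := PySem.List.mem_pyRange_one.mp hi
      have hi' : 0 ≤ i ∧ i < (keys.length : Int) := ⟨hmpr.1, hmpr.2⟩
      have hkmem : pvKey keys i ∈ keys := by
        rw [pvKey_getElem keys i hi'.1 hi'.2]
        exact List.getElem_mem _
      exact hlook _ hkmem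
    rw [List.map_congr_left hstep1]
    have hcomp : (fun i => ((PySem.List.dedup keys).idxOf (pvKey keys i) : Int))
        = (fun k => ((PySem.List.dedup keys).idxOf k : Int)) ∘ (pvKey keys) := rfl
    rw [hcomp, ← List.map_map, hmapkeys]
  · -- reverse dict
    show (PySem.Dict.ofList ((PySem.List.enumerate (pvF keys) 0).map
        (fun p => (p.1, PySem.List.pyGetD keys p.2 ("str", ""))))).items = _
    have hlist : (PySem.List.enumerate (pvF keys) 0).map
        (fun p => (p.1, PySem.List.pyGetD keys p.2 ("str", "")))
        = PySem.List.enumerate (PySem.List.dedup keys) 0 := by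
      apply List.ext_getElem
      · simp [hlenF, PySem.List.length_enumerate]
      · intro k h1 h2
        have hkF : k < (pvF keys).length := by
          simpa [PySem.List.length_enumerate] using h1
        have hk' : k < (PySem.List.dedup keys).length := by rwa [hlenF] at hkF
        have hg1 : (PySem.List.enumerate (pvF keys) 0)[k]'(by simpa [PySem.List.length_enumerate] using hkF)
            = ((k : Int), (pvF keys)[k]'hkF) := by
          rw [PySem.List.getElem_enumerate]
          simp
        simp only [List.getElem_map, hg1]
        rw [PySem.List.getElem_enumerate]
        have hgetF : (pvF keys)[k]'hkF = pvIdx keys ((PySem.List.dedup keys)[k]'hk') := by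
          simp [pvF]
        have hmem : (PySem.List.dedup keys)[k]'hk' ∈ keys :=
          (PySem.List.mem_dedup _ _).mp (List.getElem_mem _)
        have hpg : PySem.List.pyGetD keys (pvIdx keys ((PySem.List.dedup keys)[k]'hk')) ("str", "")
            = (PySem.List.dedup keys)[k]'hk' := by
          have hidx : keys.idxOf ((PySem.List.dedup keys)[k]'hk') < keys.length :=
            List.idxOf_lt_length_of_mem hmem
          show pvKey keys (pvIdx keys ((PySem.List.dedup keys)[k]'hk')) = _
          rw [pvIdx, pvKey_getElem keys _ (Int.natCast_nonneg _) (by exact_mod_cast hidx)]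
          simp only [Int.toNat_natCast]
          exact List.getElem_idxOf hidx
        rw [hgetF, hpg]
        simp
    rw [hlist]
    apply pvItems_ofList
    have hp := PySem.List.pairwise_lt_enumerate (PySem.List.dedup keys) 0
    exact (List.pairwise_map.mpr hp).nodup

-- ===== VERDICT (by name: the statement is the Claim_ definition above) =====
theorem hash_biject_array_spec : Claim_equal_hash_biject_array := by
  intro arr _
  unfold Spec_hash_biject_array
  rw [pvA_char, pvB_char]
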